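-- pv_equiv track=rewrite | github.com/OckermanSethGVSU/ISYE_524_W26 | visualize_solution.py | family_tree_lines
-- ===== SOURCE A (Python) =====
-- from collections import Counter, defaultdict
--
-- def bom_children_by_parent(bom_rows: list[dict[str, str]]) -> dict[str, list[str]]:
--     children_by_parent: dict[str, list[str]] = defaultdict(list)
--     for row in bom_rows:
--         children_by_parent[row["parent_component_id"]].append(row["child_component_id"])
--     return dict(children_by_parent)
--
-- def family_tree_lines(root_component_id: str, bom_rows: list[dict[str, str]]) -> list[str]:
--     children_by_parent = bom_children_by_parent(bom_rows)
--     lines = [root_component_id]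
--
--     def visit(component_id: str, prefix: str) -> None:
--         children = children_by_parent.get(component_id, [])
--         for index, child_id in enumerate(children):
--             connector = "`-- " if index == len(children) - 1 else "|-- "
--             lines.append(f"{prefix}{connector}{child_id}")
--             next_prefix = f"{prefix}{'    ' if index == len(children) - 1 else '|   '}"
--             visit(child_id, next_prefix)
--
--     visit(root_component_id, "")
--     return lines
-- ===== SOURCE B (Python) =====
-- def family_tree_lines(root_component_id, bom_rows):
--     children_by_parent = {}
--     for row in bom_rows:
--         children_by_parent.setdefault(row["parent_component_id"], []).append(row["child_component_id"])
--
--     def child_frames(component_id, prefix):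
--         children = children_by_parent.get(component_id, [])
--         last = len(children) - 1
--         return [
--             (child,
--              prefix + ("`-- " if index == last else "|-- ") + child,
--              prefix + ("    " if index == last else "|   "))
--             for index, child in enumerate(children)
--         ]
--
--     lines = [root_component_id]
--     stack = child_frames(root_component_id, "")
--     stack.reverse()
--     while stack:
--         component_id, line, prefix = stack.pop()
--         lines.append(line)
--         stack.extend(reversed(child_frames(component_id, prefix)))
--     return lines
-- ===== Notes on version B (the rewrite author's own statement) =====
-- stated objective: alternative
-- what changed: The recursive visit closure mutating a shared lines list is replaced by an iterative explicit-stack pre-order DFS: (child, line, next_prefix) frames are precomputed per node and pushed in reverse so they pop in original order; no recursion.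
import Mathlib
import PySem

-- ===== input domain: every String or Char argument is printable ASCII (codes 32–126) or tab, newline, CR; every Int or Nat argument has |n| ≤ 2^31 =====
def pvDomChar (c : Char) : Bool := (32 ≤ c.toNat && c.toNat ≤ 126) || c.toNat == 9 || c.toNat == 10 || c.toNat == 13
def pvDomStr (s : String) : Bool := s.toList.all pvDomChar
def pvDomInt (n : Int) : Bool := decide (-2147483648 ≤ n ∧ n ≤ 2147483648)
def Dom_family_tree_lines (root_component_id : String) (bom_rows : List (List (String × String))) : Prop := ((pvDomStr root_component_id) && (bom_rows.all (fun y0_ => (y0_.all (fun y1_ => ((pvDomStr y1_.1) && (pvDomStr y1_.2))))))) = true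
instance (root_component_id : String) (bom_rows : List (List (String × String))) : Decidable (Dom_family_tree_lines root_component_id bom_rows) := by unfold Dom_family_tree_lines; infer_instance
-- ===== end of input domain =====

-- B replaces the recursive `visit` (shared mutable `lines` list) by an iterative explicit-stack
-- pre-order DFS over precomputed (child, line, pfx) frames; same values, same order (objective: alternative).

-- ===== PORT A =====

-- row[k]: first matching key of the row dict; a missing key is a KeyError in Python, excluded by Pre_.
def pvRowGet (row : List (String × String)) (k : String) : String :=
  (PySem.Dict.mk row).getD k ""

-- bom_children_by_parent: defaultdict(list) grouping loop (children_by_parent[p].append(c)).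
def pvBuild (bom_rows : List (List (String × String))) : PySem.Dict String (List String) :=
  bom_rows.foldl
    (fun d row => d.modify (pvRowGet row "parent_component_id") []
      (· ++ [pvRowGet row "child_component_id"]))
    PySem.Dict.empty

-- the recursive `visit`, returning the lines it appends; fuel 2*len(bom_rows)+3 bounds the
-- recursion depth on every input admitted by Pre_ (acyclic ⇒ ancestor chains are duplicate-free).
def pvVisit (d : PySem.Dict String (List String)) : Nat → String → String → List String
  | 0, _, _ => []
  | f + 1, component_id, pfx =>
    let children := d.getD component_id []
    (PySem.List.enumerate children).foldl
      (fun lines ic =>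
        let connector := if ic.1 = (children.length : Int) - 1 then "`-- " else "|-- "
        let next_prefix := pfx ++ (if ic.1 = (children.length : Int) - 1 then "    " else "|   ")
        (lines ++ [pfx ++ connector ++ ic.2]) ++ pvVisit d f ic.2 next_prefix)
      []

def family_tree_lines (root_component_id : String) (bom_rows : List (List (String × String))) : List String :=
  let d := pvBuild bom_rows
  [root_component_id] ++ pvVisit d (2 * bom_rows.length + 3) root_component_id ""

-- ===== PORT B =====

-- child_frames(component_id, pfx): the list comprehension of (child, line, next_prefix) frames.
def pvFrames (d : PySem.Dict String (List String)) (component_id pfx : String) :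
    List (String × String × String) :=
  let children := d.getD component_id []
  (PySem.List.enumerate children).map
    (fun ic =>
      (ic.2,
       pfx ++ (if ic.1 = (children.length : Int) - 1 then "`-- " else "|-- ") ++ ic.2,
       pfx ++ (if ic.1 = (children.length : Int) - 1 then "    " else "|   ")))

-- the while-stack loop; the Lean list is the Python stack reversed (head = top), so
-- stack.pop() is the head and stack.extend(reversed(frames)) is frames ++ rest.
-- Fuel (len+1)^(2*len+3) bounds the number of iterations (= lines emitted) under Pre_.
def pvRun (d : PySem.Dict String (List String)) :
    Nat → List (String × String × String) → List String → List String
  | 0, _, lines => lines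
  | _ + 1, [], lines => lines
  | f + 1, fr :: rest, lines => pvRun d f (pvFrames d fr.1 fr.2.2 ++ rest) (lines ++ [fr.2.1])

def family_tree_lines_alt (root_component_id : String) (bom_rows : List (List (String × String))) : List String :=
  let d := pvBuild bom_rows
  pvRun d ((bom_rows.length + 1) ^ (2 * bom_rows.length + 3))
    (pvFrames d root_component_id "") [root_component_id]

-- ===== PRECONDITION & SPEC =====

-- Nodes joined to `a` by a parent→child edge path of length 1..f.  This is a property of the
-- input's edge set (bound f = 2*len+3 exceeds every duplicate-free path, so membership below is
-- plain graph reachability); it shares nothing with either port (no lines, prefixes or stack).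
def pvDescend (d : PySem.Dict String (List String)) : Nat → String → List String
  | 0, _ => []
  | f + 1, a => (d.getD a []).flatMap (fun k => k :: pvDescend d f k)

-- Pre_ excludes exactly the inputs on which A raises: a row missing one of the two keys
-- (KeyError), and a parent→child cycle reachable from the root (A's recursion never
-- terminates: RecursionError); on all other inputs A returns normally.  The second conjunct
-- is ordinary cycle-freeness of the input graph below the root, stated as membership in
-- bounded-length edge paths (pvDescend above).
def Pre_family_tree_lines (root_component_id : String) (bom_rows : List (List (String × String))) : Prop :=
  (∀ row ∈ bom_rows, (PySem.Dict.mk row).contains "parent_component_id" = true ∧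
      (PySem.Dict.mk row).contains "child_component_id" = true) ∧
  (∀ c ∈ root_component_id ::
      pvDescend (pvBuild bom_rows) (2 * bom_rows.length + 3) root_component_id,
      c ∉ pvDescend (pvBuild bom_rows) (2 * bom_rows.length + 3) c)

instance (root_component_id : String) (bom_rows : List (List (String × String))) : Decidable (Pre_family_tree_lines root_component_id bom_rows) := by unfold Pre_family_tree_lines; infer_instance

def pvWitness_family_tree_lines : String × (List (List (String × String))) :=
  ("A", [[("parent_component_id", "A"), ("child_component_id", "B")],
         [("parent_component_id", "A"), ("child_component_id", "C")],
         [("parent_component_id", "B"), ("child_component_id", "D")]])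

def Spec_family_tree_lines (root_component_id : String) (bom_rows : List (List (String × String))) (out : List String) : Prop := out = family_tree_lines_alt root_component_id bom_rows
instance (root_component_id : String) (bom_rows : List (List (String × String))) (out : List String) : Decidable (Spec_family_tree_lines root_component_id bom_rows out) := by unfold Spec_family_tree_lines; infer_instance

-- ===== CLAIM (what is proved, stated in full; the proofs are below) =====
def Claim_equal_family_tree_lines : Prop := ∀ (root_component_id : String) (bom_rows : List (List (String × String))), Dom_family_tree_lines root_component_id bom_rows → Pre_family_tree_lines root_component_id bom_rows → Spec_family_tree_lines root_component_id bom_rows (family_tree_lines root_component_id bom_rows)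

-- ===== LEMMAS AND PROOFS =====

-- the per-child contribution of one iteration of A's visit-loop (line, then the subtree)
def pvStep (d : PySem.Dict String (List String)) (f : Nat) (pfx : String) (len : Nat) :
    (Int × String) → List String :=
  fun ic =>
    (pfx ++ (if ic.1 = (len : Int) - 1 then "`-- " else "|-- ") ++ ic.2) ::
      pvVisit d f ic.2 (pfx ++ (if ic.1 = (len : Int) - 1 then "    " else "|   "))

-- downward ancestor chain: anc = [parent of cid, grandparent, …]
def pvChain (d : PySem.Dict String (List String)) : String → List String → Prop
  | _, [] => True
  | c, p :: rest => c ∈ d.getD p [] ∧ pvChain d p rest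

-- invariant of a DFS position: a duplicate-free edge-chain from the root down to cid
def pvInv (d : PySem.Dict String (List String)) (root : String) (nodes : List String)
    (cid : String) (anc : List String) : Prop :=
  pvChain d cid anc ∧ (cid :: anc).Nodup ∧ (∀ x ∈ cid :: anc, x ∈ nodes) ∧
    (cid :: anc).getLast? = some root

theorem pvFlatMap_congr {α β : Type} (l : List α) (f g : α → List β)
    (h : ∀ x ∈ l, f x = g x) : l.flatMap f = l.flatMap g := by
  induction l with
  | nil => rfl
  | cons a t ih =>
    simp only [List.flatMap_cons]
    rw [h a (by simp), ih (fun x hx => h x (by simp [hx]))]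

theorem pvEnum_snd_mem {α : Type} (xs : List α) (s : Int) (p : Int × α)
    (h : p ∈ PySem.List.enumerate xs s) : p.2 ∈ xs := by
  rw [PySem.List.mem_enumerate_iff] at h
  obtain ⟨k, hk, rfl⟩ := h
  exact List.getElem_mem hk

theorem pvVisit_succ (d : PySem.Dict String (List String)) (f : Nat) (cid pre : String) :
    pvVisit d (f + 1) cid pre =
      (PySem.List.enumerate (d.getD cid [])).flatMap (pvStep d f pre (d.getD cid []).length) := by
  have h : pvVisit d (f + 1) cid pre
      = (PySem.List.enumerate (d.getD cid [])).foldl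
          (fun lines ic => lines ++ pvStep d f pre (d.getD cid []).length ic) [] := by
    simp only [pvVisit]
    exact PySem.List.foldl_congr_mem _ _ _ _ (fun acc ic _ => by simp [pvStep])
  rw [h, PySem.List.foldl_append_eq_flatMap]
  simp

theorem pvFrames_eq (d : PySem.Dict String (List String)) (cid pre : String) :
    pvFrames d cid pre =
      (PySem.List.enumerate (d.getD cid [])).map
        (fun ic =>
          (ic.2,
           pre ++ (if ic.1 = ((d.getD cid []).length : Int) - 1 then "`-- " else "|-- ") ++ ic.2,
           pre ++ (if ic.1 = ((d.getD cid []).length : Int) - 1 then "    " else "|   "))) := rfl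

theorem pvFrames_fst_mem (d : PySem.Dict String (List String)) (cid pre : String)
    (fr : String × String × String) (h : fr ∈ pvFrames d cid pre) : fr.1 ∈ d.getD cid [] := by
  rw [pvFrames_eq, List.mem_map] at h
  obtain ⟨ic, hic, rfl⟩ := h
  exact pvEnum_snd_mem _ _ _ hic

theorem pvDescend_mono (d : PySem.Dict String (List String)) :
    ∀ f g a, f ≤ g → pvDescend d f a ⊆ pvDescend d g a := by
  intro f
  induction f with
  | zero => intro g a _; simp [pvDescend]
  | succ f ih =>
    intro g a hfg x hx
    obtain ⟨g', rfl⟩ : ∃ g', g = g' + 1 := ⟨g - 1, by omega⟩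
    simp only [pvDescend, List.mem_flatMap, List.mem_cons] at hx ⊢
    obtain ⟨k, hk, hx⟩ := hx
    refine ⟨k, hk, ?_⟩
    rcases hx with h | hx
    · exact Or.inl h
    · exact Or.inr (ih g' k (by omega) hx)

theorem pvDescend_step (d : PySem.Dict String (List String)) (f : Nat) (a k : String)
    (h : k ∈ d.getD a []) : k ∈ pvDescend d (f + 1) a := by
  simp only [pvDescend, List.mem_flatMap]
  exact ⟨k, h, List.mem_cons_self⟩

theorem pvDescend_trans (d : PySem.Dict String (List String)) :
    ∀ f g a b c, b ∈ pvDescend d f a → c ∈ pvDescend d g b → c ∈ pvDescend d (f + g) a := by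
  intro f
  induction f with
  | zero => intro g a b c hb; simp [pvDescend] at hb
  | succ f ih =>
    intro g a b c hb hc
    simp only [pvDescend, List.mem_flatMap, List.mem_cons] at hb
    obtain ⟨k, hk, hb⟩ := hb
    have : c ∈ pvDescend d (f + 1 + g) a ↔ c ∈ pvDescend d (f + g + 1) a := by
      rw [show f + 1 + g = f + g + 1 by omega]
    rw [this]
    simp only [pvDescend, List.mem_flatMap]
    refine ⟨k, hk, ?_⟩
    rcases hb with h | hb
    · exact List.mem_cons_of_mem _ (pvDescend_mono d g (f + g) k (by omega) (h ▸ hc))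
    · exact List.mem_cons_of_mem _ (ih g k b c hb hc)

theorem pvChain_descend (d : PySem.Dict String (List String)) :
    ∀ anc cid a, pvChain d cid anc → a ∈ anc → cid ∈ pvDescend d anc.length a := by
  intro anc
  induction anc with
  | nil => intro cid a _ ha; simp at ha
  | cons p rest ih =>
    intro cid a hch ha
    obtain ⟨hedge, hch'⟩ := hch
    rcases List.mem_cons.mp ha with rfl | ha
    · exact pvDescend_step d rest.length a cid hedge
    · have h1 : p ∈ pvDescend d rest.length a := ih p a hch' ha
      have h2 : cid ∈ pvDescend d 1 p := pvDescend_step d 0 p cid hedge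
      have := pvDescend_trans d rest.length 1 a p cid h1 h2
      simpa using this

theorem pvInv_len (d : PySem.Dict String (List String)) (root : String) (nodes : List String)
    (cid : String) (anc : List String) (h : pvInv d root nodes cid anc) :
    anc.length + 1 ≤ nodes.length := by
  have hsub : (cid :: anc) ⊆ nodes := fun x hx => h.2.2.1 x hx
  have := (List.subperm_of_subset h.2.1 hsub).length_le
  simpa using this

theorem pvInv_step (d : PySem.Dict String (List String)) (root : String) (nodes : List String)
    (N : Nat) (hN : nodes.length ≤ N)
    (hacyc : ∀ c ∈ root :: pvDescend d N root, c ∉ pvDescend d N c)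
    (cid : String) (anc : List String) (h : pvInv d root nodes cid anc)
    (k : String) (hk : k ∈ d.getD cid []) (hknodes : k ∈ nodes) :
    pvInv d root nodes k (cid :: anc) := by
  obtain ⟨hch, hnd, hsub, hlast⟩ := h
  have hlen := pvInv_len d root nodes cid anc ⟨hch, hnd, hsub, hlast⟩
  have hN1 : 1 ≤ N := by omega
  -- k is reachable from the root
  have hkreach : k ∈ root :: pvDescend d N root := by
    cases anc with
    | nil =>
      have hcid : cid = root := by simpa using hlast
      exact List.mem_cons_of_mem _
        (pvDescend_mono d 1 N root (by omega) (pvDescend_step d 0 root k (hcid ▸ hk)))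
    | cons p rest =>
      have hroot_mem : root ∈ p :: rest := by
        have : (p :: rest).getLast? = some root := by
          rw [← List.getLast?_cons_cons (a := cid)]; exact hlast
        exact List.mem_of_getLast? this
      have h1 : cid ∈ pvDescend d (p :: rest).length root :=
        pvChain_descend d (p :: rest) cid root hch hroot_mem
      have h2 : k ∈ pvDescend d 1 cid := pvDescend_step d 0 cid k hk
      have h3 := pvDescend_trans d (p :: rest).length 1 root cid k h1 h2
      exact List.mem_cons_of_mem _
        (pvDescend_mono d ((p :: rest).length + 1) N root (by simp at hlen ⊢; omega) h3)
  have hkacyc := hacyc k hkreach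
  -- k is not on the current chain
  have hknot : k ∉ cid :: anc := by
    intro hmem
    rcases List.mem_cons.mp hmem with rfl | hmem
    · exact hkacyc (pvDescend_mono d 1 N k hN1 (pvDescend_step d 0 k k hk))
    · have h1 : cid ∈ pvDescend d anc.length k := pvChain_descend d anc cid k hch hmem
      have h2 : k ∈ pvDescend d 1 cid := pvDescend_step d 0 cid k hk
      have h3 := pvDescend_trans d anc.length 1 k cid k h1 h2
      exact hkacyc (pvDescend_mono d (anc.length + 1) N k (by omega) h3)
  refine ⟨⟨hk, hch⟩, List.nodup_cons.mpr ⟨hknot, hnd⟩, ?_, ?_⟩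
  · intro x hx
    rcases List.mem_cons.mp hx with rfl | hx
    · exact hknodes
    · exact hsub x hx
  · rw [List.getLast?_cons_cons]; exact hlast

theorem pvVisit_stab (d : PySem.Dict String (List String)) (root : String) (nodes : List String)
    (N : Nat) (hN : nodes.length ≤ N)
    (hacyc : ∀ c ∈ root :: pvDescend d N root, c ∉ pvDescend d N c)
    (hclosed : ∀ c k, k ∈ d.getD c [] → k ∈ nodes) :
    ∀ m cid anc pre f1 f2, pvInv d root nodes cid anc →
      nodes.length + 1 ≤ anc.length + m →
      nodes.length + 1 ≤ anc.length + f1 → nodes.length + 1 ≤ anc.length + f2 →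
      pvVisit d f1 cid pre = pvVisit d f2 cid pre := by
  intro m
  induction m with
  | zero =>
    intro cid anc pre f1 f2 hinv hm _ _
    have := pvInv_len d root nodes cid anc hinv
    omega
  | succ m ih =>
    intro cid anc pre f1 f2 hinv hm hf1 hf2
    have hlen := pvInv_len d root nodes cid anc hinv
    obtain ⟨a, rfl⟩ : ∃ a, f1 = a + 1 := ⟨f1 - 1, by omega⟩
    obtain ⟨b, rfl⟩ : ∃ b, f2 = b + 1 := ⟨f2 - 1, by omega⟩
    rw [pvVisit_succ, pvVisit_succ]
    apply pvFlatMap_congr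
    intro ic hic
    have hmem : ic.2 ∈ d.getD cid [] := pvEnum_snd_mem _ _ _ hic
    have hinv' := pvInv_step d root nodes N hN hacyc cid anc hinv ic.2 hmem
      (hclosed cid ic.2 hmem)
    simp only [pvStep]
    rw [ih ic.2 (cid :: anc) _ a b hinv' (by simp; omega) (by simp; omega) (by simp; omega)]

theorem pvVisit_frames (d : PySem.Dict String (List String)) (root : String) (nodes : List String)
    (N : Nat) (hN : nodes.length ≤ N)
    (hacyc : ∀ c ∈ root :: pvDescend d N root, c ∉ pvDescend d N c)
    (hclosed : ∀ c k, k ∈ d.getD c [] → k ∈ nodes)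
    (F : Nat) (hF : nodes.length + 2 ≤ F)
    (cid : String) (anc : List String) (pre : String) (h : pvInv d root nodes cid anc) :
    pvVisit d F cid pre =
      (pvFrames d cid pre).flatMap (fun fr => fr.2.1 :: pvVisit d F fr.1 fr.2.2) := by
  have hlen := pvInv_len d root nodes cid anc h
  obtain ⟨F', rfl⟩ : ∃ F', F = F' + 1 := ⟨F - 1, by omega⟩
  rw [pvVisit_succ, pvFrames_eq, List.flatMap_map]
  apply pvFlatMap_congr
  intro ic hic
  have hmem : ic.2 ∈ d.getD cid [] := pvEnum_snd_mem _ _ _ hic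
  have hinv' := pvInv_step d root nodes N hN hacyc cid anc h ic.2 hmem (hclosed cid ic.2 hmem)
  simp only [pvStep]
  rw [pvVisit_stab d root nodes N hN hacyc hclosed (nodes.length + 1) ic.2 (cid :: anc) _
    F' (F' + 1) hinv' (by simp only [List.length_cons]; omega)
    (by simp only [List.length_cons]; omega) (by simp only [List.length_cons]; omega)]

theorem pvRun_spec (d : PySem.Dict String (List String)) (root : String) (nodes : List String)
    (N : Nat) (hN : nodes.length ≤ N)
    (hacyc : ∀ c ∈ root :: pvDescend d N root, c ∉ pvDescend d N c)
    (hclosed : ∀ c k, k ∈ d.getD c [] → k ∈ nodes)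
    (F : Nat) (hF : nodes.length + 2 ≤ F) :
    ∀ fb stack acc,
      (∀ fr ∈ stack, ∃ anc, pvInv d root nodes fr.1 anc) →
      (stack.flatMap (fun fr => fr.2.1 :: pvVisit d F fr.1 fr.2.2)).length ≤ fb →
      pvRun d fb stack acc =
        acc ++ stack.flatMap (fun fr => fr.2.1 :: pvVisit d F fr.1 fr.2.2) := by
  intro fb
  induction fb with
  | zero =>
    intro stack acc hst hcost
    cases stack with
    | nil => simp [pvRun]
    | cons fr rest => simp at hcost
  | succ fb ih =>
    intro stack acc hst hcost
    cases stack with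
    | nil => simp [pvRun]
    | cons fr rest =>
      obtain ⟨anc, hinv⟩ := hst fr List.mem_cons_self
      have hexp := pvVisit_frames d root nodes N hN hacyc hclosed F hF fr.1 anc fr.2.2 hinv
      have hst' : ∀ fr' ∈ pvFrames d fr.1 fr.2.2 ++ rest, ∃ anc', pvInv d root nodes fr'.1 anc' := by
        intro fr' hfr'
        rcases List.mem_append.mp hfr' with hfr' | hfr'
        · have hmem := pvFrames_fst_mem d fr.1 fr.2.2 fr' hfr'
          exact ⟨fr.1 :: anc, pvInv_step d root nodes N hN hacyc fr.1 anc hinv fr'.1 hmem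
            (hclosed fr.1 fr'.1 hmem)⟩
        · exact hst fr' (List.mem_cons_of_mem _ hfr')
      have hcost' :
          ((pvFrames d fr.1 fr.2.2 ++ rest).flatMap
            (fun fr => fr.2.1 :: pvVisit d F fr.1 fr.2.2)).length ≤ fb := by
        simp only [List.flatMap_append, List.length_append] at hcost ⊢
        simp only [List.flatMap_cons, List.length_append, List.length_cons] at hcost
        rw [← hexp]
        omega
      show pvRun d fb (pvFrames d fr.1 fr.2.2 ++ rest) (acc ++ [fr.2.1]) = _
      rw [ih _ _ hst' hcost']
      simp [hexp]

theorem pvBuild_eq (bom_rows : List (List (String × String))) :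
    pvBuild bom_rows =
      (bom_rows.map (fun row =>
          (pvRowGet row "parent_component_id", pvRowGet row "child_component_id"))).foldl
        (fun d p => d.modify p.1 [] (· ++ [p.2])) PySem.Dict.empty := by
  rw [List.foldl_map]
  rfl

theorem pvKids_eq (bom_rows : List (List (String × String))) (c : String) :
    (pvBuild bom_rows).getD c [] =
      ((bom_rows.map (fun row =>
          (pvRowGet row "parent_component_id", pvRowGet row "child_component_id"))).filter
        (fun p => p.1 == c)).map (·.2) := by
  rw [pvBuild_eq, PySem.Dict.getD_foldl_modify_append]
  simp

theorem pvKids_sub (bom_rows : List (List (String × String))) (c k : String)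
    (h : k ∈ (pvBuild bom_rows).getD c []) :
    k ∈ bom_rows.map (fun row => pvRowGet row "child_component_id") := by
  rw [pvKids_eq] at h
  simp only [List.mem_map, List.mem_filter] at h
  obtain ⟨p, ⟨hp, _⟩, rfl⟩ := h
  simp only [List.mem_map] at hp ⊢
  obtain ⟨row, hrow, rfl⟩ := hp
  exact ⟨row, hrow, rfl⟩

theorem pvKids_len (bom_rows : List (List (String × String))) (c : String) :
    ((pvBuild bom_rows).getD c []).length ≤ bom_rows.length := by
  rw [pvKids_eq, List.length_map]
  have h := List.length_filter_le (fun p => p.1 == c)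
    (bom_rows.map (fun row => (pvRowGet row "parent_component_id", pvRowGet row "child_component_id")))
  simpa using h

theorem pvVisit_len (d : PySem.Dict String (List String)) (K : Nat)
    (hK : ∀ c, (d.getD c []).length ≤ K) :
    ∀ f cid pre, (pvVisit d f cid pre).length + 1 ≤ (K + 1) ^ f := by
  intro f
  induction f with
  | zero => intro cid pre; simp [pvVisit]
  | succ f ih =>
    intro cid pre
    rw [pvVisit_succ]
    have hbound : ∀ ic ∈ PySem.List.enumerate (d.getD cid []),
        (pvStep d f pre (d.getD cid []).length ic).length ≤ (K + 1) ^ f := by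
      intro ic _
      simp only [pvStep, List.length_cons]
      have := ih ic.2 (pre ++ (if ic.1 = ((d.getD cid []).length : Int) - 1 then "    " else "|   "))
      omega
    have hlen : ((PySem.List.enumerate (d.getD cid [])).flatMap
        (pvStep d f pre (d.getD cid []).length)).length ≤ K * (K + 1) ^ f := by
      rw [List.length_flatMap]
      calc ((PySem.List.enumerate (d.getD cid [])).map
              (fun ic => (pvStep d f pre (d.getD cid []).length ic).length)).sum
          ≤ ((PySem.List.enumerate (d.getD cid [])).map
              (fun ic => (pvStep d f pre (d.getD cid []).length ic).length)).length * (K + 1) ^ f := by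
            apply List.sum_le_card_nsmul
            intro x hx
            simp only [List.mem_map] at hx
            obtain ⟨ic, hic, rfl⟩ := hx
            exact hbound ic hic
        _ ≤ K * (K + 1) ^ f := by
            simp only [List.length_map, PySem.List.length_enumerate]
            exact Nat.mul_le_mul_right _ (hK cid)
    have hpos : 1 ≤ (K + 1) ^ f := Nat.one_le_pow _ _ (by omega)
    have : (K + 1) ^ (f + 1) = K * (K + 1) ^ f + (K + 1) ^ f := by ring
    omega

-- ===== VERDICT (by name: the statement is the Claim_ definition above) =====
theorem family_tree_lines_spec : Claim_equal_family_tree_lines := by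
  intro root bom_rows _ hpre
  obtain ⟨_, hacyc⟩ := hpre
  unfold Spec_family_tree_lines family_tree_lines family_tree_lines_alt
  set d := pvBuild bom_rows with hd
  set nodes := root :: bom_rows.map (fun row => pvRowGet row "child_component_id") with hnodes
  set N := 2 * bom_rows.length + 3 with hNdef
  have hlen : nodes.length = bom_rows.length + 1 := by simp [hnodes]
  have hN : nodes.length ≤ N := by omega
  have hF : nodes.length + 2 ≤ N := by omega
  have hclosed : ∀ c k, k ∈ d.getD c [] → k ∈ nodes := by
    intro c k hk
    exact List.mem_cons_of_mem _ (pvKids_sub bom_rows c k hk)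
  have hrootinv : pvInv d root nodes root [] :=
    ⟨trivial, List.nodup_singleton root, by simp [hnodes], by simp⟩
  have hstack : ∀ fr ∈ pvFrames d root "", ∃ anc, pvInv d root nodes fr.1 anc := by
    intro fr hfr
    have hmem := pvFrames_fst_mem d root "" fr hfr
    exact ⟨[root], pvInv_step d root nodes N hN hacyc root [] hrootinv fr.1 hmem
      (hclosed root fr.1 hmem)⟩
  have hexp := pvVisit_frames d root nodes N hN hacyc hclosed N hF root [] "" hrootinv
  have hcost :
      ((pvFrames d root "").flatMap (fun fr => fr.2.1 :: pvVisit d N fr.1 fr.2.2)).length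
        ≤ (bom_rows.length + 1) ^ N := by
    rw [← hexp]
    have := pvVisit_len d bom_rows.length (fun c => pvKids_len bom_rows c) N root ""
    omega
  show [root] ++ pvVisit d N root "" = pvRun d ((bom_rows.length + 1) ^ N) (pvFrames d root "") [root]
  rw [pvRun_spec d root nodes N hN hacyc hclosed N hF _ _ _ hstack hcost, ← hexp]
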